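-- pv_equiv track=rewrite | github.com/sandesh-argon/atlas | archive/legacy/v2.0/precompute_permutations/precompute_all_graphs.py | get_layer_bands
-- ===== SOURCE A (Python) =====
-- def get_layer_bands(layer_mode):
--     """Get layer compression bands."""
--     if layer_mode == 2:
--         return [[i for i in range(11)], [i for i in range(11, 21)]]
--     elif layer_mode == 3:
--         return [[i for i in range(7)], [i for i in range(7, 14)], [i for i in range(14, 21)]]
--     elif layer_mode == 5:
--         return [[0], [1,2,3,4,5], [6,7,8,9,10,11,12,13,14], [15,16,17,18], [19,20]]
--     else:  # 21 layers (full)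
--         return [[i] for i in range(21)]
-- ===== SOURCE B (Python) =====
-- def get_layer_bands(layer_mode):
--     """Get layer compression bands."""
--     # A band starts at layer i iff the mode's start-predicate fires at i;
--     # a single pass over the 21 layers groups them into bands.
--     starts = {2: lambda i: i % 11 == 0,
--               3: lambda i: i % 7 == 0,
--               5: lambda i: i in (0, 1, 6, 15, 19)}.get(layer_mode, lambda i: True)
--     bands = []
--     for i in range(21):
--         if starts(i):
--             bands.append([])
--         bands[-1].append(i)
--     return bands
-- ===== Notes on version B (the rewrite author's own statement) =====
-- stated objective: alternative
-- what changed: Instead of returning each mode's bands as literal branch values, B iterates once over the 21 layers and groups them with an accumulator, opening a new band whenever the mode's start-predicate (i%11==0, i%7==0, membership, or always) fires.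
import Mathlib
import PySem

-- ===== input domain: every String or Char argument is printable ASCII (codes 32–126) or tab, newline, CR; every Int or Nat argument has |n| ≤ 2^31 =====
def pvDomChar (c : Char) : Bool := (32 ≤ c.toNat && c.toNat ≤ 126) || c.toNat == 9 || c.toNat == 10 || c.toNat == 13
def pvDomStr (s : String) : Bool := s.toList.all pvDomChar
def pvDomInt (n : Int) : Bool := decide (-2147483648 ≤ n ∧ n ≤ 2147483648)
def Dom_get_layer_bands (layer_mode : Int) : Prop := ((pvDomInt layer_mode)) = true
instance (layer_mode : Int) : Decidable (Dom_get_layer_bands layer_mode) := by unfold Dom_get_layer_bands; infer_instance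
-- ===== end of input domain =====

-- B groups the 21 layers in one accumulator pass, opening a new band where the mode's start-predicate fires (objective: alternative).

-- ===== PORT A =====
def get_layer_bands (layer_mode : Int) : List (List Int) :=
  if layer_mode = 2 then
    [PySem.List.pyRange 0 11 1, PySem.List.pyRange 11 21 1]
  else if layer_mode = 3 then
    [PySem.List.pyRange 0 7 1, PySem.List.pyRange 7 14 1, PySem.List.pyRange 14 21 1]
  else if layer_mode = 5 then
    [[0], [1,2,3,4,5], [6,7,8,9,10,11,12,13,14], [15,16,17,18], [19,20]]
  else
    (PySem.List.pyRange 0 21 1).map (fun i => [i])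

-- ===== PORT B =====
-- bands[-1].append(i): every predicate fires at i = 0, so bands is nonempty whenever
-- the last element is accessed; getLastD [] is exact here.
def get_layer_bands_alt (layer_mode : Int) : List (List Int) :=
  let starts : Int → Bool :=
    (PySem.Dict.ofList [((2 : Int), fun i => PySem.Int.mod i 11 == 0),
                        (3, fun i => PySem.Int.mod i 7 == 0),
                        (5, fun i => i == 0 || i == 1 || i == 6 || i == 15 || i == 19)]).getD
      layer_mode (fun _ => true)
  (PySem.List.pyRange 0 21 1).foldl
    (fun bands i =>
      let bands := if starts i then bands ++ [[]] else bands
      bands.dropLast ++ [bands.getLastD [] ++ [i]]) []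

-- ===== PRECONDITION & SPEC =====
def Spec_get_layer_bands (layer_mode : Int) (out : List (List Int)) : Prop := out = get_layer_bands_alt layer_mode
instance (layer_mode : Int) (out : List (List Int)) : Decidable (Spec_get_layer_bands layer_mode out) := by unfold Spec_get_layer_bands; infer_instance

-- ===== CLAIM (what is proved, stated in full; the proofs are below) =====
def Claim_equal_get_layer_bands : Prop := ∀ (layer_mode : Int), Dom_get_layer_bands layer_mode → Spec_get_layer_bands layer_mode (get_layer_bands layer_mode)

-- ===== LEMMAS AND PROOFS =====

-- ===== VERDICT (by name: the statement is the Claim_ definition above) =====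
theorem get_layer_bands_spec : Claim_equal_get_layer_bands := by
  intro m _
  unfold Spec_get_layer_bands
  by_cases h2 : m = 2
  · subst h2; decide
  · by_cases h3 : m = 3
    · subst h3; decide
    · by_cases h5 : m = 5
      · subst h5; decide
      · show get_layer_bands m = get_layer_bands_alt m
        rw [show get_layer_bands m = (PySem.List.pyRange 0 21 1).map (fun i => [i]) by
              simp [get_layer_bands, h2, h3, h5]]
        rw [get_layer_bands_alt]
        have hd :
            (PySem.Dict.ofList [((2 : Int), fun i => PySem.Int.mod i 11 == 0),
                (3, fun i => PySem.Int.mod i 7 == 0),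
                (5, fun i => i == 0 || i == 1 || i == 6 || i == 15 || i == 19)]).getD
              m (fun _ => true) = (fun _ => true) := by
          simp [PySem.Dict.ofList, PySem.Dict.update, PySem.Dict.getD_insert, PySem.Dict.getD_empty, h2, h3, h5]
        rw [hd]
        decide
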